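-- pv_equiv track=rewrite | github.com/eythorb19/2019-T-111-PROG | projects/p9/paragraph_analysis.py | convert_to_word_counts
-- ===== SOURCE A (Python) =====
-- def convert_to_word_counts(all_paragraphs):
--     ''' all_paragraphs is a list of list of words.
--         Each sublist contains the words found in the corresponding paragraph.
--         The result is a dictionary of counts.
--         The key is a word, the value for the word is the total count of the words in all paragraphs. '''
--
--     word_counts = {}
--     for word_list in all_paragraphs:
--         for word in word_list:
--             if word in word_counts:
--                 word_counts[word] += 1
--             else:
--                 word_counts[word] = 1
--     return word_counts
-- ===== SOURCE B (Python) =====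
-- def convert_to_word_counts(all_paragraphs):
--     ''' Same result as A: flatten all words into one list, then build the
--         dictionary in one comprehension over the first-occurrence-ordered
--         distinct words, counting each with list.count. '''
--     flat = [word for word_list in all_paragraphs for word in word_list]
--     return {word: flat.count(word) for word in dict.fromkeys(flat)}
-- ===== Notes on version B (the rewrite author's own statement) =====
-- stated objective: simpler
-- what changed: Replaces the nested mutate-a-dict loops by a flatten + ordered-dedup + one dict comprehension counting each distinct word with list.count.
import Mathlib
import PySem

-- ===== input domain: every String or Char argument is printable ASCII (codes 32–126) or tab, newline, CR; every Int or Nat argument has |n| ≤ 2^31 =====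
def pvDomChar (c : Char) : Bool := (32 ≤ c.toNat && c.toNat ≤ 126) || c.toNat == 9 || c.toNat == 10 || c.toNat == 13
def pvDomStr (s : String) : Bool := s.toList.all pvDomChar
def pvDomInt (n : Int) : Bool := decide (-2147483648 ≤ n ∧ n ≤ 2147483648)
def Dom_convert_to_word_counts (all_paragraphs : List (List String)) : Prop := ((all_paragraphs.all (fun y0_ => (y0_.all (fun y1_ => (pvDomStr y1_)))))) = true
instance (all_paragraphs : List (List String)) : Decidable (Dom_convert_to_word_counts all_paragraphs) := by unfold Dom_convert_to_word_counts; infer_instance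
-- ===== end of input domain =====

-- B replaces A's nested mutate-a-dict loops by flatten + ordered dedup + a per-word count; return values proved equal (same pairs, same order).

-- ===== PORT A =====
-- word_counts = {}; for word_list in all_paragraphs: for word in word_list:
--   if word in word_counts: word_counts[word] += 1 else: word_counts[word] = 1
def convert_to_word_counts (all_paragraphs : List (List String)) : List (String × Int) :=
  (all_paragraphs.foldl
    (fun d word_list =>
      word_list.foldl
        (fun d word =>
          if d.contains word then d.insert word (d.getD word 0 + 1)
          else d.insert word 1)
        d)
    (PySem.Dict.empty : PySem.Dict String Int)).items

-- ===== PORT B =====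
-- flat = [word for word_list in all_paragraphs for word in word_list]
-- return {word: flat.count(word) for word in dict.fromkeys(flat)}
def convert_to_word_counts_alt (all_paragraphs : List (List String)) : List (String × Int) :=
  let flat := all_paragraphs.flatMap (fun word_list => word_list)
  (PySem.List.dedup flat).map (fun word => (word, (PySem.List.count flat word : Int)))

-- ===== PRECONDITION & SPEC =====
def Spec_convert_to_word_counts (all_paragraphs : List (List String)) (out : List (String × Int)) : Prop := out = convert_to_word_counts_alt all_paragraphs
instance (all_paragraphs : List (List String)) (out : List (String × Int)) : Decidable (Spec_convert_to_word_counts all_paragraphs out) := by unfold Spec_convert_to_word_counts; infer_instance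

-- ===== CLAIM (what is proved, stated in full; the proofs are below) =====
def Claim_equal_convert_to_word_counts : Prop := ∀ (all_paragraphs : List (List String)), Dom_convert_to_word_counts all_paragraphs → Spec_convert_to_word_counts all_paragraphs (convert_to_word_counts all_paragraphs)

-- ===== LEMMAS AND PROOFS =====

-- A's loop body is exactly 'd[word] = d.get(word, 0) + 1' (in the else branch the stored value is 1 = 0 + 1).
theorem pv_step_eq (d : PySem.Dict String Int) (w : String) :
    (if d.contains w then d.insert w (d.getD w 0 + 1) else d.insert w 1)
      = d.insert w (d.getD w 0 + 1) := by
  by_cases h : d.contains w = true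
  · simp [h]
  · rw [Bool.not_eq_true] at h
    simp [h, PySem.Dict.getD_of_not_contains]

-- ===== VERDICT (by name: the statement is the Claim_ definition above) =====
theorem convert_to_word_counts_spec : Claim_equal_convert_to_word_counts := by
  intro ap _
  show convert_to_word_counts ap = convert_to_word_counts_alt ap
  unfold convert_to_word_counts convert_to_word_counts_alt
  simp only [pv_step_eq, ← List.foldl_flatten,
    PySem.Dict.foldl_insert_getD_add_one_eq_counter, PySem.Dict.items_counter,
    PySem.List.dedup_eq_ofList, PySem.List.count_eq, List.flatMap_id']
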